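-- pv_equiv track=rewrite | github.com/Pa7ch3s/Unveil | unveil/findings_export.py | export_findings_md
-- ===== SOURCE A (Python) =====
-- from typing import List, Dict, Any, Optional
--
-- def export_findings_md(rows: List[Dict[str, str]]) -> str:
--     """Return findings table as Markdown."""
--     if not rows:
--         return ""
--     lines = ["| Title | Severity | Category | Path | Snippet | CWE | Recommendation |", "|-------|----------|----------|------|---------|-----|-----------------|"]
--     for r in rows:
--         title = (r.get("Title") or "").replace("|", "\\|")[:60]
--         sev = r.get("Severity") or ""
--         cat = (r.get("Category") or "").replace("|", "\\|")[:20]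
--         path = (r.get("Path") or "").replace("|", "\\|")[:50]
--         snippet = (r.get("Snippet") or "").replace("|", "\\|").replace("\n", " ")[:80]
--         cwe = r.get("CWE") or ""
--         rec = (r.get("Recommendation") or "").replace("|", "\\|").replace("\n", " ")[:80]
--         lines.append(f"| {title} | {sev} | {cat} | {path} | {snippet} | {cwe} | {rec} |")
--     return "\n".join(lines)
-- ===== SOURCE B (Python) =====
-- # Column-major rewrite: each of the seven columns is computed as a whole list
-- # in its own pass over the rows, then the columns are zipped back into lines.
-- def _column(rows, key, maxlen=None, esc=False, strip_nl=False):
--     cells = []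
--     for r in rows:
--         v = r.get(key) or ""
--         if esc:
--             v = v.replace("|", "\\|")
--         if strip_nl:
--             v = v.replace("\n", " ")
--         cells.append(v[:maxlen])
--     return cells
--
--
-- def export_findings_md(rows):
--     """Return findings table as Markdown."""
--     if not rows:
--         return ""
--     columns = [
--         _column(rows, "Title", 60, True),
--         _column(rows, "Severity"),
--         _column(rows, "Category", 20, True),
--         _column(rows, "Path", 50, True),
--         _column(rows, "Snippet", 80, True, True),
--         _column(rows, "CWE"),
--         _column(rows, "Recommendation", 80, True, True),
--     ]
--     lines = [
--         "| Title | Severity | Category | Path | Snippet | CWE | Recommendation |",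
--         "|-------|----------|----------|------|---------|-----|-----------------|",
--     ]
--     for cells in zip(*columns):
--         lines.append("| " + " | ".join(cells) + " |")
--     return "\n".join(lines)
-- ===== Notes on version B (the rewrite author's own statement) =====
-- stated objective: alternative
-- what changed: Switches from A's row-major single pass (seven inlined assignments per row) to a column-major computation: each of the seven columns is materialised by its own pass over the rows through one generic column builder, and the columns are then zipped back together into the table lines.
import Mathlib
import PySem

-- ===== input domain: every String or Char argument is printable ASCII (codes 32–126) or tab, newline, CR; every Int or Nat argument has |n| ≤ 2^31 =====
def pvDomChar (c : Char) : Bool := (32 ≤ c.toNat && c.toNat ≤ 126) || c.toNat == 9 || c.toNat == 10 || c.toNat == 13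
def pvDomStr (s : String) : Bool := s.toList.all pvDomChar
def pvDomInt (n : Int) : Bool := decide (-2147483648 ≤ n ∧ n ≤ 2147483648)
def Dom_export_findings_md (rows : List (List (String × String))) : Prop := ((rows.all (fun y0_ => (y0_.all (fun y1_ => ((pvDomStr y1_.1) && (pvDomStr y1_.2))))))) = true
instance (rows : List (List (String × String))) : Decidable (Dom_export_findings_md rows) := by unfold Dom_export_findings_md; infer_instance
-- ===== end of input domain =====

-- B replaces A's row-major single pass with a column-major computation: one
-- pass per column, then the seven columns are zipped back into lines
-- (objective: alternative decomposition; same output, same asymptotic cost).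

-- ===== PORT A =====
def export_findings_md (rows : List (List (String × String))) : String :=
  if rows.isEmpty then "" else
  let lines := rows.foldl (fun lines r =>
    let title := PySem.Str.slice (PySem.Str.replace ((PySem.Dict.get? (PySem.Dict.mk r) "Title").getD "") "|" "\\|") none (some 60)
    let sev := (PySem.Dict.get? (PySem.Dict.mk r) "Severity").getD ""
    let cat := PySem.Str.slice (PySem.Str.replace ((PySem.Dict.get? (PySem.Dict.mk r) "Category").getD "") "|" "\\|") none (some 20)
    let path := PySem.Str.slice (PySem.Str.replace ((PySem.Dict.get? (PySem.Dict.mk r) "Path").getD "") "|" "\\|") none (some 50)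
    let snippet := PySem.Str.slice (PySem.Str.replace (PySem.Str.replace ((PySem.Dict.get? (PySem.Dict.mk r) "Snippet").getD "") "|" "\\|") "\n" " ") none (some 80)
    let cwe := (PySem.Dict.get? (PySem.Dict.mk r) "CWE").getD ""
    let rec_ := PySem.Str.slice (PySem.Str.replace (PySem.Str.replace ((PySem.Dict.get? (PySem.Dict.mk r) "Recommendation").getD "") "|" "\\|") "\n" " ") none (some 80)
    lines ++ ["| " ++ title ++ " | " ++ sev ++ " | " ++ cat ++ " | " ++ path ++ " | " ++ snippet ++ " | " ++ cwe ++ " | " ++ rec_ ++ " |"])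
    ["| Title | Severity | Category | Path | Snippet | CWE | Recommendation |", "|-------|----------|----------|------|---------|-----|-----------------|"]
  PySem.Str.join "\n" lines

-- ===== PORT B =====
-- one cell of a column: fetch, optionally escape '|', optionally strip newlines, truncate
def pvColCell (key : String) (maxlen : Option Int) (esc strip_nl : Bool) (r : List (String × String)) : String :=
  let v := (PySem.Dict.get? (PySem.Dict.mk r) key).getD ""
  let v := if esc then PySem.Str.replace v "|" "\\|" else v
  let v := if strip_nl then PySem.Str.replace v "\n" " " else v
  PySem.Str.slice v none maxlen

-- one pass over the rows producing a whole column (Python's _column loop)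
def pvColumn (rows : List (List (String × String))) (key : String) (maxlen : Option Int) (esc strip_nl : Bool) : List String :=
  rows.map (pvColCell key maxlen esc strip_nl)

-- Python's `for cells in zip(*columns): lines.append(...)` over the 7 columns
def pvZipRows : List String → List String → List String → List String → List String → List String → List String → List String
  | a::t1, b::t2, c::t3, d::t4, e::t5, f::t6, g::t7 =>
      ("| " ++ PySem.Str.join " | " [a, b, c, d, e, f, g] ++ " |") :: pvZipRows t1 t2 t3 t4 t5 t6 t7
  | _, _, _, _, _, _, _ => []

def export_findings_md_alt (rows : List (List (String × String))) : String :=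
  if rows.isEmpty then "" else
  let body := pvZipRows
    (pvColumn rows "Title" (some 60) true false)
    (pvColumn rows "Severity" none false false)
    (pvColumn rows "Category" (some 20) true false)
    (pvColumn rows "Path" (some 50) true false)
    (pvColumn rows "Snippet" (some 80) true true)
    (pvColumn rows "CWE" none false false)
    (pvColumn rows "Recommendation" (some 80) true true)
  PySem.Str.join "\n"
    (["| Title | Severity | Category | Path | Snippet | CWE | Recommendation |", "|-------|----------|----------|------|---------|-----|-----------------|"] ++ body)

-- ===== PRECONDITION & SPEC =====
def Spec_export_findings_md (rows : List (List (String × String))) (out : String) : Prop := out = export_findings_md_alt rows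
instance (rows : List (List (String × String))) (out : String) : Decidable (Spec_export_findings_md rows out) := by unfold Spec_export_findings_md; infer_instance

-- ===== CLAIM (what is proved, stated in full; the proofs are below) =====
def Claim_equal_export_findings_md : Prop := ∀ (rows : List (List (String × String))), Dom_export_findings_md rows → Spec_export_findings_md rows (export_findings_md rows)

-- ===== LEMMAS AND PROOFS =====

theorem pv_join7 (s a b c d e f g : String) :
    PySem.Str.join s [a, b, c, d, e, f, g] = a ++ s ++ b ++ s ++ c ++ s ++ d ++ s ++ e ++ s ++ f ++ s ++ g := by
  have h : (a ++ s ++ b ++ s ++ c ++ s ++ d ++ s ++ e ++ s ++ f ++ s ++ g).toList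
      = s.toList.intercalate [a.toList, b.toList, c.toList, d.toList, e.toList, f.toList, g.toList] := by
    simp [List.intercalate, List.intersperse]
  simp [PySem.Str.join, PySem.Chars.join, ← h, String.append_assoc]

theorem pv_foldl_append {α β : Type} (g : List β → α → List β) (f : α → β)
    (hg : ∀ acc r, g acc r = acc ++ [f r]) :
    ∀ (l : List α) (init : List β), l.foldl g init = init ++ l.map f := by
  intro l
  induction l with
  | nil => intro init; simp
  | cons x xs ih => intro init; simp [List.foldl, hg, ih]

-- zipping the seven mapped columns of the SAME row list is a row-major map
theorem pv_zip_map (f1 f2 f3 f4 f5 f6 f7 : List (String × String) → String) :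
    ∀ (l : List (List (String × String))),
      pvZipRows (l.map f1) (l.map f2) (l.map f3) (l.map f4) (l.map f5) (l.map f6) (l.map f7)
        = l.map (fun r => "| " ++ PySem.Str.join " | " [f1 r, f2 r, f3 r, f4 r, f5 r, f6 r, f7 r] ++ " |") := by
  intro l
  induction l with
  | nil => rfl
  | cons x xs ih => simp [List.map, pvZipRows, ih]

-- A's row string is B's zipped row string
theorem pv_row_eq (r : List (String × String)) :
    "| " ++ PySem.Str.slice (PySem.Str.replace ((PySem.Dict.get? (PySem.Dict.mk r) "Title").getD "") "|" "\\|") none (some 60)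
      ++ " | " ++ (PySem.Dict.get? (PySem.Dict.mk r) "Severity").getD ""
      ++ " | " ++ PySem.Str.slice (PySem.Str.replace ((PySem.Dict.get? (PySem.Dict.mk r) "Category").getD "") "|" "\\|") none (some 20)
      ++ " | " ++ PySem.Str.slice (PySem.Str.replace ((PySem.Dict.get? (PySem.Dict.mk r) "Path").getD "") "|" "\\|") none (some 50)
      ++ " | " ++ PySem.Str.slice (PySem.Str.replace (PySem.Str.replace ((PySem.Dict.get? (PySem.Dict.mk r) "Snippet").getD "") "|" "\\|") "\n" " ") none (some 80)
      ++ " | " ++ (PySem.Dict.get? (PySem.Dict.mk r) "CWE").getD ""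
      ++ " | " ++ PySem.Str.slice (PySem.Str.replace (PySem.Str.replace ((PySem.Dict.get? (PySem.Dict.mk r) "Recommendation").getD "") "|" "\\|") "\n" " ") none (some 80)
      ++ " |"
    = "| " ++ PySem.Str.join " | "
        [pvColCell "Title" (some 60) true false r,
         pvColCell "Severity" none false false r,
         pvColCell "Category" (some 20) true false r,
         pvColCell "Path" (some 50) true false r,
         pvColCell "Snippet" (some 80) true true r,
         pvColCell "CWE" none false false r,
         pvColCell "Recommendation" (some 80) true true r] ++ " |" := by
  simp only [pvColCell, pv_join7]
  norm_num
  simp only [PySem.Str.slice]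
  simp [String.append_assoc]

theorem pv_row_eq_acc (acc : List String) (r : List (String × String)) :
    acc ++ ["| " ++ PySem.Str.slice (PySem.Str.replace ((PySem.Dict.get? (PySem.Dict.mk r) "Title").getD "") "|" "\\|") none (some 60)
      ++ " | " ++ (PySem.Dict.get? (PySem.Dict.mk r) "Severity").getD ""
      ++ " | " ++ PySem.Str.slice (PySem.Str.replace ((PySem.Dict.get? (PySem.Dict.mk r) "Category").getD "") "|" "\\|") none (some 20)
      ++ " | " ++ PySem.Str.slice (PySem.Str.replace ((PySem.Dict.get? (PySem.Dict.mk r) "Path").getD "") "|" "\\|") none (some 50)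
      ++ " | " ++ PySem.Str.slice (PySem.Str.replace (PySem.Str.replace ((PySem.Dict.get? (PySem.Dict.mk r) "Snippet").getD "") "|" "\\|") "\n" " ") none (some 80)
      ++ " | " ++ (PySem.Dict.get? (PySem.Dict.mk r) "CWE").getD ""
      ++ " | " ++ PySem.Str.slice (PySem.Str.replace (PySem.Str.replace ((PySem.Dict.get? (PySem.Dict.mk r) "Recommendation").getD "") "|" "\\|") "\n" " ") none (some 80)
      ++ " |"]
    = acc ++ ["| " ++ PySem.Str.join " | "
        [pvColCell "Title" (some 60) true false r,
         pvColCell "Severity" none false false r,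
         pvColCell "Category" (some 20) true false r,
         pvColCell "Path" (some 50) true false r,
         pvColCell "Snippet" (some 80) true true r,
         pvColCell "CWE" none false false r,
         pvColCell "Recommendation" (some 80) true true r] ++ " |"] := by
  exact congrArg (fun s => acc ++ [s]) (pv_row_eq r)

theorem pv_main (rows : List (List (String × String))) :
    export_findings_md rows = export_findings_md_alt rows := by
  cases rows with
  | nil => rfl
  | cons x xs =>
    show PySem.Str.join "\n"
        (List.foldl (fun acc r => acc ++ ["| " ++ PySem.Str.slice (PySem.Str.replace ((PySem.Dict.get? (PySem.Dict.mk r) "Title").getD "") "|" "\\|") none (some 60)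
      ++ " | " ++ (PySem.Dict.get? (PySem.Dict.mk r) "Severity").getD ""
      ++ " | " ++ PySem.Str.slice (PySem.Str.replace ((PySem.Dict.get? (PySem.Dict.mk r) "Category").getD "") "|" "\\|") none (some 20)
      ++ " | " ++ PySem.Str.slice (PySem.Str.replace ((PySem.Dict.get? (PySem.Dict.mk r) "Path").getD "") "|" "\\|") none (some 50)
      ++ " | " ++ PySem.Str.slice (PySem.Str.replace (PySem.Str.replace ((PySem.Dict.get? (PySem.Dict.mk r) "Snippet").getD "") "|" "\\|") "\n" " ") none (some 80)
      ++ " | " ++ (PySem.Dict.get? (PySem.Dict.mk r) "CWE").getD ""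
      ++ " | " ++ PySem.Str.slice (PySem.Str.replace (PySem.Str.replace ((PySem.Dict.get? (PySem.Dict.mk r) "Recommendation").getD "") "|" "\\|") "\n" " ") none (some 80)
      ++ " |"])
          ["| Title | Severity | Category | Path | Snippet | CWE | Recommendation |", "|-------|----------|----------|------|---------|-----|-----------------|"] (x :: xs))
      = PySem.Str.join "\n"
        (["| Title | Severity | Category | Path | Snippet | CWE | Recommendation |", "|-------|----------|----------|------|---------|-----|-----------------|"] ++
          pvZipRows (pvColumn (x :: xs) "Title" (some 60) true false)
            (pvColumn (x :: xs) "Severity" none false false)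
            (pvColumn (x :: xs) "Category" (some 20) true false)
            (pvColumn (x :: xs) "Path" (some 50) true false)
            (pvColumn (x :: xs) "Snippet" (some 80) true true)
            (pvColumn (x :: xs) "CWE" none false false)
            (pvColumn (x :: xs) "Recommendation" (some 80) true true))
    rw [pv_foldl_append _ _ pv_row_eq_acc]
    simp only [pvColumn, pv_zip_map]

-- ===== VERDICT (by name: the statement is the Claim_ definition above) =====
theorem export_findings_md_spec : Claim_equal_export_findings_md := by
  intro rows _
  unfold Spec_export_findings_md
  exact pv_main rows
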